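-- pv_equiv track=rewrite | github.com/Kyoto-01/py_mini_projects | numeric_expression_analyzer/analyzer.py | segment_exp
-- ===== SOURCE A (Python) =====
-- def segment_exp(exp: str) -> list[str]:
--     segmented_exp = ''
--     for char in exp:
--         if char.isdigit() or char == '.':
--             segmented_exp += char
--         else:
--             segmented_exp += f' {char} '
--
--     return segmented_exp.split()
-- ===== SOURCE B (Python) =====
-- def segment_exp(exp: str) -> list[str]:
--     tokens = []
--     cur = ''
--     for char in exp:
--         if char.isdigit() or char == '.':
--             cur += char
--         else:
--             if cur:
--                 tokens.append(cur)
--                 cur = ''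
--             if not char.isspace():
--                 tokens.append(char)
--     if cur:
--         tokens.append(cur)
--     return tokens
-- ===== Notes on version B (the rewrite author's own statement) =====
-- stated objective: simpler
-- what changed: Replaces A's build-a-padded-string-then-split() round trip with a single-pass state machine that keeps a current-number buffer and appends tokens directly to the result list (no intermediate padded string, no split).
import Mathlib
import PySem

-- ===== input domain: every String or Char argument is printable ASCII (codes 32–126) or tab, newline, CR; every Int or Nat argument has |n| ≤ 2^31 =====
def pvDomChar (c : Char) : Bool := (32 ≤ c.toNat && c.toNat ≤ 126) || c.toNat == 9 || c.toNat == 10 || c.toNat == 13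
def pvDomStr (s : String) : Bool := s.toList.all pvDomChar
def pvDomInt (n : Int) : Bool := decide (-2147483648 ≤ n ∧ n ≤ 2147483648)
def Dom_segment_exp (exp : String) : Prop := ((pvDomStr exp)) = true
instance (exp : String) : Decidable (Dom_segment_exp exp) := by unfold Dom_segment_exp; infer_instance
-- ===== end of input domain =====

-- B replaces A's pad-with-spaces-then-split() round trip with a direct one-pass
-- tokenizer (simpler decomposition, same O(n) cost).

-- ===== PORT A =====
-- A builds the padded string by += over the characters, then calls .split();
-- the string is kept as a List Char, and .split() is PySem.Chars.split₀.
def segment_exp (exp : String) : List String :=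
  let segmented : List Char :=
    exp.toList.foldl
      (fun acc char =>
        if PySem.Chars.isdigit char || char == '.' then acc ++ [char]
        else acc ++ ([' '] ++ [char] ++ [' ']))
      []
  (PySem.Chars.split₀ segmented).map String.ofList

-- ===== PORT B =====
-- the loop of Source B: state = (tokens so far, current number buffer)
def segAltGo (cs : List Char) (tokens : List (List Char)) (cur : List Char) :
    List (List Char) :=
  match cs with
  | [] => if cur = [] then tokens else tokens ++ [cur]
  | char :: rest =>
    if PySem.Chars.isdigit char || char == '.' then
      segAltGo rest tokens (cur ++ [char])
    else
      let tokens1 := if cur = [] then tokens else tokens ++ [cur]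
      if PySem.Chars.isspace char then segAltGo rest tokens1 []
      else segAltGo rest (tokens1 ++ [[char]]) []

def segment_exp_alt (exp : String) : List String :=
  (segAltGo exp.toList [] []).map String.ofList

-- ===== PRECONDITION & SPEC =====
def Spec_segment_exp (exp : String) (out : List String) : Prop := out = segment_exp_alt exp
instance (exp : String) (out : List String) : Decidable (Spec_segment_exp exp out) := by unfold Spec_segment_exp; infer_instance

-- ===== CLAIM (what is proved, stated in full; the proofs are below) =====
def Claim_equal_segment_exp : Prop := ∀ (exp : String), Dom_segment_exp exp → Spec_segment_exp exp (segment_exp exp)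

-- ===== LEMMAS AND PROOFS =====

-- what A appends for one character
def segPiece (char : Char) : List Char :=
  if PySem.Chars.isdigit char || char == '.' then [char] else [' ', char, ' ']

theorem segAltGo_acc (cs : List Char) (tokens : List (List Char)) (cur : List Char) :
    segAltGo cs tokens cur = tokens ++ segAltGo cs [] cur := by
  induction cs generalizing tokens cur with
  | nil => by_cases h : cur = [] <;> simp [segAltGo, h]
  | cons c rest ih =>
    by_cases h1 : (PySem.Chars.isdigit c || c == '.') = true
    · simp only [segAltGo, if_pos h1]
      exact ih tokens (cur ++ [c])
    · by_cases h2 : PySem.Chars.isspace c = true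
      · by_cases h : cur = []
        · simp only [segAltGo, if_neg h1, if_pos h2, if_pos h]
          exact ih tokens []
        · simp only [segAltGo, if_neg h1, if_pos h2, if_neg h]
          simp only [List.nil_append]
          rw [ih (tokens ++ [cur]) [], ih [cur] []]
          simp
      · by_cases h : cur = []
        · simp only [segAltGo, if_neg h1, if_neg h2, if_pos h]
          simp only [List.nil_append]
          rw [ih (tokens ++ [[c]]) [], ih [[c]] []]
          simp
        · simp only [segAltGo, if_neg h1, if_neg h2, if_neg h]
          simp only [List.nil_append]
          rw [ih (tokens ++ [cur] ++ [[c]]) [], ih ([cur] ++ [[c]]) []]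
          simp

theorem notspace_of_digit_dot (c : Char)
    (h : (PySem.Chars.isdigit c || c == '.') = true) :
    PySem.Chars.isspace c = false := by
  simp only [PySem.Chars.isdigit, PySem.Chars.isspace, Bool.or_eq_true,
    Bool.and_eq_true, decide_eq_true_eq, beq_iff_eq] at *
  rcases h with ⟨h1, h2⟩ | rfl
  · have l1 : ('0' : Char).toNat ≤ c.toNat := h1
    have l2 : c.toNat ≤ ('9' : Char).toNat := h2
    simp only [show ('0' : Char).toNat = 48 from rfl,
      show ('9' : Char).toNat = 57 from rfl] at l1 l2
    simp only [Bool.or_eq_false_iff, Bool.and_eq_false_iff,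
      decide_eq_false_iff_not]
    omega
  · decide

theorem split₀_go_eq (cs : List Char) (cur : List Char) (acc : List (List Char)) :
    PySem.Chars.split₀.go (cs.flatMap segPiece) cur acc
      = acc.reverse ++ segAltGo cs [] cur.reverse := by
  induction cs generalizing cur acc with
  | nil =>
    by_cases h : cur = [] <;>
      simp [PySem.Chars.split₀.go, segAltGo, h, List.isEmpty_iff]
  | cons c rest ih =>
    by_cases hd : (PySem.Chars.isdigit c || c == '.') = true
    · have hs := notspace_of_digit_dot c hd
      simp only [segPiece, List.flatMap_cons, hd, if_true, List.singleton_append,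
        segAltGo]
      rw [PySem.Chars.split₀.go]
      simp only [hs, Bool.false_eq_true, if_false]
      rw [ih (c :: cur) acc]
      simp
    · simp only [Bool.not_eq_true] at hd
      simp only [segPiece, List.flatMap_cons, hd, Bool.false_eq_true, if_false]
      simp only [List.cons_append, List.nil_append]
      rw [PySem.Chars.split₀.go]
      simp only [show PySem.Chars.isspace ' ' = true from rfl, if_true]
      by_cases hc : cur = []
      · subst hc
        simp only [List.isEmpty_nil, if_true, List.reverse_nil]
        by_cases hsp : PySem.Chars.isspace c = true
        · rw [PySem.Chars.split₀.go]
          simp only [hsp, if_true, List.isEmpty_nil]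
          rw [PySem.Chars.split₀.go]
          simp only [show PySem.Chars.isspace ' ' = true from rfl, if_true,
            List.isEmpty_nil, if_true]
          rw [ih [] acc]
          simp [segAltGo, hd, hsp]
        · rw [PySem.Chars.split₀.go]
          simp only [hsp, Bool.false_eq_true, if_false]
          rw [PySem.Chars.split₀.go]
          simp only [show PySem.Chars.isspace ' ' = true from rfl, if_true,
            List.isEmpty_cons, if_false]
          rw [ih [] ([c].reverse :: acc)]
          simp only [List.reverse_cons, List.reverse_nil, List.nil_append,
            List.reverse_append, List.reverse_reverse]
          rw [show segAltGo (c :: rest) [] [] = segAltGo rest [[c]] [] by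
            simp [segAltGo, hd, hsp]]
          rw [segAltGo_acc rest [[c]] []]
          simp
      · simp only [List.isEmpty_iff, hc, if_false]
        by_cases hsp : PySem.Chars.isspace c = true
        · rw [PySem.Chars.split₀.go]
          simp only [hsp, if_true, List.isEmpty_nil]
          rw [PySem.Chars.split₀.go]
          simp only [show PySem.Chars.isspace ' ' = true from rfl, if_true,
            List.isEmpty_nil, if_true]
          rw [ih [] (cur.reverse :: acc)]
          rw [show segAltGo (c :: rest) [] cur.reverse
                = segAltGo rest [cur.reverse] [] by
            simp [segAltGo, hd, hsp, List.reverse_eq_nil_iff, hc]]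
          rw [segAltGo_acc rest [cur.reverse] []]
          simp
        · rw [PySem.Chars.split₀.go]
          simp only [hsp, Bool.false_eq_true, if_false]
          rw [PySem.Chars.split₀.go]
          simp only [show PySem.Chars.isspace ' ' = true from rfl, if_true,
            List.isEmpty_cons, if_false]
          rw [ih [] ([c].reverse :: cur.reverse :: acc)]
          rw [show segAltGo (c :: rest) [] cur.reverse
                = segAltGo rest ([cur.reverse] ++ [[c]]) [] by
            simp [segAltGo, hd, hsp, List.reverse_eq_nil_iff, hc]]
          rw [segAltGo_acc rest ([cur.reverse] ++ [[c]]) []]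
          simp

-- ===== VERDICT (by name: the statement is the Claim_ definition above) =====
theorem segment_exp_spec : Claim_equal_segment_exp := by
  intro exp _
  show segment_exp exp = segment_exp_alt exp
  unfold segment_exp segment_exp_alt
  have hfold :
      exp.toList.foldl
        (fun acc char =>
          if PySem.Chars.isdigit char || char == '.' then acc ++ [char]
          else acc ++ ([' '] ++ [char] ++ [' ']))
        []
        = exp.toList.flatMap segPiece := by
    have hfn : (fun (acc : List Char) (char : Char) =>
        if PySem.Chars.isdigit char || char == '.' then acc ++ [char]
        else acc ++ ([' '] ++ [char] ++ [' ']))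
        = fun acc char => acc ++ segPiece char := by
      funext acc c
      by_cases h : (PySem.Chars.isdigit c || c == '.') = true <;>
        simp [segPiece, h]
    rw [hfn]
    have := PySem.List.foldl_append_eq_flatMap segPiece exp.toList []
    simpa using this
  rw [hfold]
  show (PySem.Chars.split₀.go (exp.toList.flatMap segPiece) [] []).map String.ofList = _
  rw [split₀_go_eq exp.toList [] []]
  simp
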